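-- pv_equiv track=rewrite | github.com/gauravyad69/nepal-election-2079-general | extract_general_2079.py | _extract_constituency_pairs
-- ===== SOURCE A (Python) =====
-- from typing import Any, Iterable
--
-- def _extract_constituency_pairs(constituencies: list[dict[str, Any]]) -> list[tuple[int, int]]:
--     # The upstream lookup occasionally contains duplicate distId rows.
--     # Collapse to the maximum constituency count per district.
--     dist_to_consts: dict[int, int] = {}
--     for row in constituencies:
--         try:
--             dist_id = int(row.get("distId"))
--             consts = int(row.get("consts"))
--         except Exception:
--             continue
--         dist_to_consts[dist_id] = max(dist_to_consts.get(dist_id, 0), consts)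
--
--     pairs: list[tuple[int, int]] = []
--     for dist_id in sorted(dist_to_consts):
--         for c in range(1, dist_to_consts[dist_id] + 1):
--             pairs.append((dist_id, c))
--     return pairs
-- ===== SOURCE B (Python) =====
-- from itertools import groupby
-- from typing import Any
--
--
-- def _extract_constituency_pairs(constituencies: list[dict[str, Any]]) -> list[tuple[int, int]]:
--     # Sort-then-groupby: collect valid rows once, sort by district, scan the
--     # consecutive groups taking each group's maximum constituency count.
--     valid: list[tuple[int, int]] = []
--     for row in constituencies:
--         try:
--             valid.append((int(row.get("distId")), int(row.get("consts"))))
--         except Exception: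
--             continue
--
--     valid.sort(key=lambda t: t[0])
--
--     pairs: list[tuple[int, int]] = []
--     for dist_id, group in groupby(valid, key=lambda t: t[0]):
--         top = max(c for _, c in group)
--         pairs.extend((dist_id, c) for c in range(1, top + 1))
--     return pairs
-- ===== Notes on version B (the rewrite author's own statement) =====
-- stated objective: alternative
-- what changed: Replaces the hash-dict max-accumulation followed by a key sort with a sort-then-groupby pipeline: valid (distId, consts) rows are collected once, sorted by district, and consecutive groups are scanned taking each group's maximum.
import Mathlib
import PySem

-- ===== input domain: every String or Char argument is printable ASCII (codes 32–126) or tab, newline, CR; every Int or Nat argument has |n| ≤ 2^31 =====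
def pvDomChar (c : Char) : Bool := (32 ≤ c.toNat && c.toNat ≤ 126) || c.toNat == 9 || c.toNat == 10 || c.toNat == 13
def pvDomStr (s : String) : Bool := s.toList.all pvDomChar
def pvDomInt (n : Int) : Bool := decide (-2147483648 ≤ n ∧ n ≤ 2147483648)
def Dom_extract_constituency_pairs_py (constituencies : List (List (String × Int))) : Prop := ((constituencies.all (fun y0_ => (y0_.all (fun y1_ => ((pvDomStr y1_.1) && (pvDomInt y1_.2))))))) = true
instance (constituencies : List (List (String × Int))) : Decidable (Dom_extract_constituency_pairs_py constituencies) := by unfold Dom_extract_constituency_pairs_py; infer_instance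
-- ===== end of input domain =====

-- One honest line: B replaces A's dict max-accumulation + key sort by a
-- sort-then-groupby scan over the valid rows (alternative algorithm, same cost).

-- ===== PORT A =====
-- A: accumulate max consts per district in a dict, then emit ranges over sorted keys.
-- 'try: int(row.get(k))' — values are Int, so int() is the identity and raises exactly
-- when .get returns None: the match's none branches are the 'except: continue'.
def extract_constituency_pairs_py (constituencies : List (List (String × Int))) : List (Int × Int) :=
  let dist_to_consts : PySem.Dict Int Int :=
    constituencies.foldl (fun d row =>
      match (PySem.Dict.mk row).get? "distId", (PySem.Dict.mk row).get? "consts" with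
      | some dist_id, some consts => d.insert dist_id (max (d.getD dist_id 0) consts)
      | _, _ => d) PySem.Dict.empty
  (PySem.List.sorted dist_to_consts.keys (fun x => x) false).foldl
    (fun pairs dist_id =>
      (PySem.List.pyRange 1 (dist_to_consts.getD dist_id 0 + 1) 1).foldl
        (fun pairs c => pairs ++ [(dist_id, c)]) pairs) []

-- ===== PORT B =====
-- B: one try/except extraction of (distId, consts) rows.
def pvRowB (row : List (String × Int)) : Option (Int × Int) := do
  let d ← (PySem.Dict.mk row).get? "distId"
  let c ← (PySem.Dict.mk row).get? "consts"
  pure (d, c)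

-- itertools.groupby(·, key=fst) ported as a right fold building consecutive runs;
-- a group (d, c, cs) holds key d and members c :: cs in list order.
def pvAddRun (p : Int × Int) (gs : List (Int × Int × List Int)) : List (Int × Int × List Int) :=
  match gs with
  | [] => [(p.1, p.2, [])]
  | g :: rest => if p.1 = g.1 then (g.1, p.2, g.2.1 :: g.2.2) :: rest else (p.1, p.2, []) :: g :: rest

def extract_constituency_pairs_py_alt (constituencies : List (List (String × Int))) : List (Int × Int) :=
  let valid := constituencies.filterMap pvRowB
  let sortedValid := PySem.List.sorted valid (fun t => t.1) false
  (sortedValid.foldr pvAddRun []).foldl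
    (fun pairs g =>
      let top := g.2.2.foldl max g.2.1    -- max of the group's consts (group is nonempty)
      pairs ++ (PySem.List.pyRange 1 (top + 1) 1).map (fun c => (g.1, c))) []

-- ===== PRECONDITION & SPEC =====
def Spec_extract_constituency_pairs_py (constituencies : List (List (String × Int))) (out : List (Int × Int)) : Prop := out = extract_constituency_pairs_py_alt constituencies
instance (constituencies : List (List (String × Int))) (out : List (Int × Int)) : Decidable (Spec_extract_constituency_pairs_py constituencies out) := by unfold Spec_extract_constituency_pairs_py; infer_instance

-- ===== CLAIM (what is proved, stated in full; the proofs are below) =====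
def Claim_equal_extract_constituency_pairs_py : Prop := ∀ (constituencies : List (List (String × Int))), Dom_extract_constituency_pairs_py constituencies → Spec_extract_constituency_pairs_py constituencies (extract_constituency_pairs_py constituencies)

-- ===== LEMMAS AND PROOFS =====

theorem pvFoldl_filterMap {α β γ : Type} (l : List α) (f : α → Option β) (g : γ → β → γ) (init : γ) :
    l.foldl (fun acc x => match f x with | some b => g acc b | none => acc) init = (l.filterMap f).foldl g init := by
  induction l generalizing init with
  | nil => rfl
  | cons x t ih =>
    simp only [List.foldl_cons, List.filterMap_cons]
    cases f x <;> simp [ih]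

-- A's dict fold over rows is the same fold over the valid rows.
theorem pvDictFold_eq (cs : List (List (String × Int))) :
    cs.foldl (fun d row =>
      match (PySem.Dict.mk row).get? "distId", (PySem.Dict.mk row).get? "consts" with
      | some dist_id, some consts => d.insert dist_id (max (d.getD dist_id 0) consts)
      | _, _ => d) PySem.Dict.empty
    = (cs.filterMap pvRowB).foldl
        (fun d p => d.insert p.1 (max (d.getD p.1 0) p.2)) PySem.Dict.empty := by
  rw [← pvFoldl_filterMap]
  apply PySem.List.foldl_congr_mem
  intro acc row _
  simp only [pvRowB]
  cases (PySem.Dict.mk row).get? "distId" <;> cases (PySem.Dict.mk row).get? "consts" <;> rfl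

-- value of the accumulated dict at any key
theorem pvDictFold_getD (l : List (Int × Int)) (D : PySem.Dict Int Int) (k : Int) :
    (l.foldl (fun d p => d.insert p.1 (max (d.getD p.1 0) p.2)) D).getD k 0
    = (l.filter (fun p => p.1 == k)).foldl (fun m p => max m p.2) (D.getD k 0) := by
  induction l generalizing D with
  | nil => rfl
  | cons p t ih =>
    simp only [List.foldl_cons, List.filter_cons]
    by_cases hpk : p.1 = k
    · subst hpk
      simp only [beq_self_eq_true, if_true, List.foldl_cons]
      rw [ih, PySem.Dict.getD_insert]
      simp
    · have hb : (p.1 == k) = false := beq_false_of_ne hpk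
      simp only [hb, Bool.false_eq_true, if_false]
      rw [ih, PySem.Dict.getD_insert, if_neg (Ne.symm hpk)]

-- grouping a fst-sorted list: keys strictly increase, head key is the head's key,
-- keys enumerate the districts, each group lists exactly its district's members.
theorem pvGroups_spec (s : List (Int × Int)) (hs : s.Pairwise (fun a b => a.1 ≤ b.1)) :
    ((s.foldr pvAddRun []).map (·.1)).Pairwise (· < ·)
    ∧ ((s.foldr pvAddRun []).map (·.1)).head? = (s.map (·.1)).head?
    ∧ (∀ d, d ∈ (s.foldr pvAddRun []).map (·.1) ↔ d ∈ s.map (·.1))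
    ∧ ∀ g ∈ s.foldr pvAddRun [], (g.2.1 :: g.2.2 : List Int) = (s.filter (fun p => p.1 == g.1)).map (·.2) := by
  induction s with
  | nil => exact ⟨List.Pairwise.nil, rfl, by simp, by simp⟩
  | cons p t ih =>
    rw [List.pairwise_cons] at hs
    obtain ⟨hp, ht⟩ := hs
    obtain ⟨ih1, ih2, ih3, ih4⟩ := ih ht
    rw [List.foldr_cons]
    cases hG : t.foldr pvAddRun [] with
    | nil =>
      have ht0 : t = [] := by
        rw [hG] at ih2
        cases t with
        | nil => rfl
        | cons q t' => simp at ih2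
      subst ht0
      refine ⟨by simp [pvAddRun], by simp [pvAddRun], by simp [pvAddRun], ?_⟩
      intro g hg
      simp only [pvAddRun, List.mem_singleton] at hg
      subst hg
      simp
    | cons g gs =>
      obtain ⟨q, t', ht'⟩ : ∃ q t', t = q :: t' := by
        cases t with
        | nil => simp at hG
        | cons q t' => exact ⟨q, t', rfl⟩
      have hqg : q.1 = g.1 := by
        rw [hG, ht'] at ih2; simpa using ih2.symm
      have hpq : p.1 ≤ g.1 := by
        rw [← hqg]; exact hp q (by rw [ht']; exact List.mem_cons_self)
      rw [hG] at ih1 ih3 ih4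
      simp only [List.map_cons, List.pairwise_cons] at ih1
      obtain ⟨hglt, hgs1⟩ := ih1
      by_cases hpg : p.1 = g.1
      · -- merge into the head group
        simp only [pvAddRun, if_pos hpg]
        refine ⟨?_, ?_, ?_, ?_⟩
        · simp only [List.map_cons, List.pairwise_cons]; exact ⟨hglt, hgs1⟩
        · simp [hpg]
        · intro d
          have := ih3 d
          simp only [List.map_cons, List.mem_cons] at this ⊢
          rw [hpg]
          tauto
        · intro g' hg'
          rcases List.mem_cons.mp hg' with hgg | hgs
          · subst hgg
            have h4 := ih4 g (List.mem_cons_self)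
            simp only [List.filter_cons, hpg, beq_self_eq_true, if_true, List.map_cons]
            rw [← h4]
          · have h4 := ih4 g' (List.mem_cons_of_mem _ hgs)
            have hne : p.1 ≠ g'.1 := by
              have : g.1 < g'.1 := hglt g'.1 (List.mem_map.mpr ⟨g', hgs, rfl⟩)
              omega
            simp only [List.filter_cons, beq_false_of_ne hne, Bool.false_eq_true, if_false]
            exact h4
      · -- a fresh group in front
        have hplt : p.1 < g.1 := lt_of_le_of_ne hpq hpg
        simp only [pvAddRun, if_neg hpg]
        have hpnotint : ∀ q' ∈ t, p.1 ≠ q'.1 := by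
          intro q' hq' heq
          have : p.1 ∈ t.map (·.1) := List.mem_map.mpr ⟨q', hq', heq.symm⟩
          have : p.1 ∈ (g :: gs).map (·.1) := (ih3 p.1).mpr this
          simp only [List.map_cons, List.mem_cons] at this
          rcases this with h | h
          · exact hpg h
          · have := hglt p.1 h
            omega
        refine ⟨?_, by simp, ?_, ?_⟩
        · simp only [List.map_cons, List.pairwise_cons] at ⊢
          refine ⟨?_, hglt, hgs1⟩
          intro b hb
          simp only [List.mem_cons] at hb
          rcases hb with h | h
          · omega
          · have := hglt b h; omega
        · intro d
          have := ih3 d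
          simp only [List.map_cons, List.mem_cons] at this ⊢
          tauto
        · intro g' hg'
          rcases List.mem_cons.mp hg' with hgg | hgs
          · subst hgg
            simp only [List.filter_cons, beq_self_eq_true, if_true, List.map_cons]
            have : t.filter (fun p' => p'.1 == (p.1 : Int)) = [] := by
              apply List.filter_eq_nil_iff.mpr
              intro q' hq'
              simpa using (hpnotint q' hq').symm
            simp [this]
          · have h4 := ih4 g' hgs
            have hne : p.1 ≠ g'.1 := by
              rcases List.mem_cons.mp hgs with h | h
              · subst h; exact hpg
              · have : g.1 < g'.1 := hglt g'.1 (List.mem_map.mpr ⟨g', h, rfl⟩)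
                omega
            simp only [List.filter_cons, beq_false_of_ne hne, Bool.false_eq_true, if_false]
            exact h4

-- running max with a joined start splits
theorem pvFoldlMax_max (l : List Int) (a b : Int) :
    l.foldl max (max a b) = max a (l.foldl max b) := by
  induction l generalizing b with
  | nil => rfl
  | cons x t ih => simpa [max_assoc] using ih (max b x)

-- empty ranges coincide: range(1, max(0,t)+1) == range(1, t+1)
theorem pvRange_clamp (t : Int) :
    PySem.List.pyRange 1 (max 0 t + 1) 1 = PySem.List.pyRange 1 (t + 1) 1 := by
  rcases le_or_gt 0 t with h | h
  · rw [max_eq_right h]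
  · rw [max_eq_left h.le]
    rw [PySem.List.pyRange_one, PySem.List.pyRange_one]
    have h1 : (0 + 1 - 1 : Int).toNat = 0 := by omega
    have h2 : (t + 1 - 1 : Int).toNat = 0 := by omega
    rw [h1, h2]

-- flatMap over the groups equals flatMap over their keys
theorem pvFlatMap_map_fst {γ : Type} (gs : List (Int × Int × List Int))
    (fB : Int × Int × List Int → List γ) (fA : Int → List γ)
    (h : ∀ g ∈ gs, fB g = fA g.1) :
    gs.flatMap fB = (gs.map (·.1)).flatMap fA := by
  induction gs with
  | nil => rfl
  | cons g t ih =>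
    simp only [List.flatMap_cons, List.map_cons,
      h g List.mem_cons_self, ih (fun g hg => h g (List.mem_cons_of_mem _ hg))]

-- ===== VERDICT (by name: the statement is the Claim_ definition above) =====
theorem extract_constituency_pairs_py_spec : Claim_equal_extract_constituency_pairs_py := by
  intro cs _
  unfold Spec_extract_constituency_pairs_py extract_constituency_pairs_py extract_constituency_pairs_py_alt
  set valid := cs.filterMap pvRowB with hvalid
  set s := PySem.List.sorted valid (fun t => t.1) false with hsdef
  set G := s.foldr pvAddRun [] with hGdef
  set DA := cs.foldl (fun d row =>
      match (PySem.Dict.mk row).get? "distId", (PySem.Dict.mk row).get? "consts" with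
      | some dist_id, some consts => d.insert dist_id (max (d.getD dist_id 0) consts)
      | _, _ => d) PySem.Dict.empty with hDA
  simp only [PySem.List.foldl_append_singleton_eq_map, PySem.List.foldl_append_eq_flatMap,
    List.nil_append]
  have hperm : s.Perm valid := PySem.List.sorted_perm valid (fun t => t.1) false
  have hsorted : s.Pairwise (fun a b => a.1 ≤ b.1) := PySem.List.sorted_pairwise valid (fun t => t.1)
  obtain ⟨hg1, _, hg3, hg4⟩ := pvGroups_spec s hsorted
  have hkeys : DA.keys = PySem.Set.ofList (valid.map (·.1)) := by
    rw [hDA, pvDictFold_eq, PySem.Dict.keys_foldl_insert_key]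
    simp [PySem.Dict.keys_empty]
    rfl
  have hK : PySem.List.sorted DA.keys (fun x => x) false = G.map (·.1) := by
    rw [hkeys]
    apply PySem.List.sorted_eq_of_perm_of_pairwise_lt
    · apply (List.perm_ext_iff_of_nodup ?_ ?_).mpr
      · intro d
        rw [hg3 d, PySem.Set.mem_ofList]
        exact List.Perm.mem_iff (hperm.map (·.1))
      · exact hg1.imp ne_of_lt
      · exact PySem.Set.nodup_ofList _
    · exact hg1
  rw [hK]
  apply (pvFlatMap_map_fst G _ _ ?_).symm
  intro g hg
  have hcontents := hg4 g hg
  have hDAg : DA.getD g.1 0 = max 0 (g.2.2.foldl max g.2.1) := by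
    rw [hDA, pvDictFold_eq, pvDictFold_getD]
    have hval : ((valid.filter (fun p => p.1 == g.1)).map (·.2)).foldl max (0 : Int)
        = ((s.filter (fun p => p.1 == g.1)).map (·.2)).foldl max 0 :=
      List.Perm.foldl_op_eq (((hperm.filter _).map _).symm)
    rw [List.foldl_map] at hval
    have h0 : PySem.Dict.empty.getD g.1 (0 : Int) = 0 := rfl
    rw [h0, hval, ← hcontents, List.foldl_cons]
    exact pvFoldlMax_max g.2.2 0 g.2.1
  rw [hDAg, pvRange_clamp]
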